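-- pv_equiv track=rewrite | github.com/kevinhui98/TIP102 | unit2Sess2.py | num_equiv_species_pairs
-- ===== SOURCE A (Python) =====
-- def num_equiv_species_pairs(species_pairs: list[int]):
--     output = 0
--     pair_set = set([])
--     for pair in species_pairs:
--         pair_set.add((pair[0], pair[1]))
--         if (pair[1], pair[0]) in pair_set:
--             output += 1
--     return output
-- ===== SOURCE B (Python) =====
-- def num_equiv_species_pairs(species_pairs: list[int]):
--     first_occ = {}
--     for i, pair in enumerate(species_pairs):
--         key = (pair[0], pair[1])
--         if key not in first_occ:
--             first_occ[key] = i
--     count = 0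
--     for i, pair in enumerate(species_pairs):
--         j = first_occ.get((pair[1], pair[0]))
--         if j is not None and j <= i:
--             count += 1
--     return count
-- ===== Notes on version B (the rewrite author's own statement) =====
-- stated objective: alternative
-- what changed: Replaces the single growing-set pass with two passes: one building a first-occurrence index table for each distinct pair, and one counting pairs whose reverse has a first occurrence at or before the current index.
import Mathlib
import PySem

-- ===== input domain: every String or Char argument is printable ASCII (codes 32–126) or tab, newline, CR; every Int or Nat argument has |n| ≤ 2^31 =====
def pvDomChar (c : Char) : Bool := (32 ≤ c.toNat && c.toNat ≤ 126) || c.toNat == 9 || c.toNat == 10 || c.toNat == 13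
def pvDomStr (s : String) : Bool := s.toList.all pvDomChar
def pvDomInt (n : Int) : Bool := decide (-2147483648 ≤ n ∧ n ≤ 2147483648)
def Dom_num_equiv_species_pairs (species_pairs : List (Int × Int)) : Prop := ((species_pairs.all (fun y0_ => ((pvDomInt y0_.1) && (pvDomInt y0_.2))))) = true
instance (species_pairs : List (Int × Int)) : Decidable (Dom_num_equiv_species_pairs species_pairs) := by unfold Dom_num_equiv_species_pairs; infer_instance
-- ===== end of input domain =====

-- B replaces A's single growing-set pass by two passes (a first-occurrence index
-- table, then a count with an index comparison); same cost, different decomposition.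

-- ===== PORT A =====
def num_equiv_species_pairs (species_pairs : List (Int × Int)) : Int :=
  (species_pairs.foldl
    (fun (st : Int × PySem.Set (Int × Int)) pair =>
      let s := PySem.Set.add st.2 (pair.1, pair.2)
      if PySem.Set.contains s (pair.2, pair.1) then (st.1 + 1, s) else (st.1, s))
    (0, PySem.Set.empty)).1

-- ===== PORT B =====
def num_equiv_species_pairs_alt (species_pairs : List (Int × Int)) : Int :=
  let first_occ : PySem.Dict (Int × Int) Int :=
    (PySem.List.enumerate species_pairs).foldl
      (fun d ip =>
        if d.contains (ip.2.1, ip.2.2) then d else d.insert (ip.2.1, ip.2.2) ip.1)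
      PySem.Dict.empty
  (PySem.List.enumerate species_pairs).foldl
    (fun (c : Int) ip =>
      match first_occ.get? (ip.2.2, ip.2.1) with
      | some j => if j ≤ ip.1 then c + 1 else c
      | none => c)
    0

-- ===== PRECONDITION & SPEC =====
def Spec_num_equiv_species_pairs (species_pairs : List (Int × Int)) (out : Int) : Prop := out = num_equiv_species_pairs_alt species_pairs
instance (species_pairs : List (Int × Int)) (out : Int) : Decidable (Spec_num_equiv_species_pairs species_pairs out) := by unfold Spec_num_equiv_species_pairs; infer_instance

-- ===== CLAIM (what is proved, stated in full; the proofs are below) =====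
def Claim_equal_num_equiv_species_pairs : Prop := ∀ (species_pairs : List (Int × Int)), Dom_num_equiv_species_pairs species_pairs → Spec_num_equiv_species_pairs species_pairs (num_equiv_species_pairs species_pairs)

-- ===== LEMMAS AND PROOFS =====

-- reference count: pvGo pre rest = number of pairs p in rest whose reverse occurs
-- in the already-seen prefix extended by p itself
def pvGo (pre : List (Int × Int)) : List (Int × Int) → Int
  | [] => 0
  | p :: rest => (if (p.2, p.1) ∈ pre ++ [p] then (1 : Int) else 0) + pvGo (pre ++ [p]) rest

theorem pvA_loop (rest : List (Int × Int)) : ∀ (pre : List (Int × Int)) (out : Int),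
    (rest.foldl
      (fun (st : Int × PySem.Set (Int × Int)) pair =>
        let s := PySem.Set.add st.2 (pair.1, pair.2)
        if PySem.Set.contains s (pair.2, pair.1) then (st.1 + 1, s) else (st.1, s))
      (out, PySem.Set.ofList pre)).1 = out + pvGo pre rest := by
  induction rest with
  | nil => intro pre out; simp [pvGo]
  | cons p rest ih =>
    intro pre out
    have hadd : PySem.Set.add (PySem.Set.ofList pre) (p.1, p.2) = PySem.Set.ofList (pre ++ [p]) := by
      simp [PySem.Set.ofList_eq_foldl, List.foldl_append]
    rw [List.foldl_cons]
    simp only [hadd]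
    by_cases h : (p.2, p.1) ∈ pre ++ [p]
    · have hct : PySem.Set.contains (PySem.Set.ofList (pre ++ [p])) (p.2, p.1) = true := by
        simp [PySem.Set.mem_ofList, h]
      rw [if_pos hct, ih (pre ++ [p]) (out + 1), pvGo, if_pos h]
      ring
    · have hct : PySem.Set.contains (PySem.Set.ofList (pre ++ [p])) (p.2, p.1) = false := by
        simp [PySem.Set.mem_ofList, h]
      rw [if_neg (by rw [hct]; simp), ih (pre ++ [p]) out, pvGo, if_neg h]
      ring

-- first-occurrence table: get? is the first index in the remaining list, offset by s,
-- unless the key was recorded already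
theorem pvFO_get (xs : List (Int × Int)) : ∀ (s : Int) (d : PySem.Dict (Int × Int) Int) (k : Int × Int),
    ((PySem.List.enumerate xs s).foldl
      (fun d ip =>
        if d.contains (ip.2.1, ip.2.2) then d else d.insert (ip.2.1, ip.2.2) ip.1) d).get? k
    = (match d.get? k with
       | some v => some v
       | none => (xs.idxOf? k).map (fun n => s + (n : Int))) := by
  induction xs with
  | nil => intro s d k; cases h : d.get? k <;> simp [PySem.List.enumerate, h, List.idxOf?]
  | cons x xs ih =>
    intro s d k
    rw [PySem.List.enumerate_cons, List.foldl_cons]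
    cases hc : d.contains x with
    | true =>
      have hv : ∃ v, d.get? x = some v := by
        have := PySem.Dict.contains_eq_isSome_get? (d := d) (k := x)
        rw [hc] at this; exact Option.isSome_iff_exists.mp this.symm
      obtain ⟨v, hv⟩ := hv
      have hstep : (fun (d : PySem.Dict (Int × Int) Int) (ip : Int × (Int × Int)) =>
          if d.contains (ip.2.1, ip.2.2) then d else d.insert (ip.2.1, ip.2.2) ip.1) d (s, x) = d := by
        simp [hc]
      rw [if_pos rfl, ih]
      by_cases hkx : k = x
      · subst hkx; simp [hv]
      · cases hdk : d.get? k with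
        | some w => simp
        | none =>
          have hbx : (x == k) = false := beq_eq_false_iff_ne.mpr (fun h => hkx h.symm)
          rw [List.idxOf?_cons, hbx]
          simp only [Bool.false_eq_true, if_false]
          rcases List.idxOf? k xs with _ | n <;> simp
          ring
    | false =>
      have hdx : d.get? x = none := by
        have := PySem.Dict.contains_eq_isSome_get? (d := d) (k := x)
        rw [hc] at this
        cases h : d.get? x with
        | none => rfl
        | some v => rw [h] at this; simp at this
      have hstep : (fun (d : PySem.Dict (Int × Int) Int) (ip : Int × (Int × Int)) =>
          if d.contains (ip.2.1, ip.2.2) then d else d.insert (ip.2.1, ip.2.2) ip.1) d (s, x)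
          = d.insert x s := by
        simp [hc]
      rw [if_neg (by simp), ih]
      dsimp only
      by_cases hkx : k = x
      · subst hkx
        rw [PySem.Dict.get?_insert_self, hdx, List.idxOf?_cons]
        simp
      · have hbx : (x == k) = false := beq_eq_false_iff_ne.mpr (fun h => hkx h.symm)
        rw [PySem.Dict.get?_insert_of_ne _ _ hkx]
        cases hdk : d.get? k with
        | some w => simp
        | none =>
          rw [List.idxOf?_cons, hbx]
          simp only [Bool.false_eq_true, if_false]
          rcases List.idxOf? k xs with _ | n <;> simp
          ring

-- first occurrence at index ≤ |pre| in pre ++ p :: rest  ↔  membership in pre ++ [p]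
theorem pv_idx_le (pre : List (Int × Int)) : ∀ (p : Int × Int) (rest : List (Int × Int)) (k : Int × Int),
    (∃ n, (pre ++ p :: rest).idxOf? k = some n ∧ n ≤ pre.length) ↔ (k ∈ pre ∨ k = p) := by
  induction pre with
  | nil =>
    intro p rest k
    constructor
    · rintro ⟨n, hn, hle⟩
      have hn0 : n = 0 := Nat.le_zero.mp hle
      subst hn0
      rw [List.nil_append, List.idxOf?_cons] at hn
      by_cases h : (p == k) = true
      · exact Or.inr (beq_iff_eq.mp h).symm
      · rw [Bool.not_eq_true] at h
        rw [h] at hn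
        simp only [Bool.false_eq_true, if_false] at hn
        obtain ⟨m, _, hm0⟩ := Option.map_eq_some_iff.mp hn
        exact absurd hm0 (by omega)
    · rintro (h | rfl)
      · exact absurd h (List.not_mem_nil)
      · refine ⟨0, ?_, Nat.le_refl _⟩
        rw [List.nil_append, List.idxOf?_cons, if_pos (beq_self_eq_true k)]
  | cons q pre ih =>
    intro p rest k
    rw [List.cons_append, List.idxOf?_cons]
    by_cases hq : (q == k) = true
    · constructor
      · intro _; exact Or.inl (beq_iff_eq.mp hq ▸ List.mem_cons_self)
      · intro _; exact ⟨0, by rw [if_pos hq], Nat.zero_le _⟩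
    · rw [Bool.not_eq_true] at hq
      rw [hq]
      simp only [Bool.false_eq_true, if_false]
      constructor
      · rintro ⟨n, hn, hle⟩
        obtain ⟨m, hm, rfl⟩ := Option.map_eq_some_iff.mp hn
        have hmle : m ≤ pre.length := by simp only [List.length_cons] at hle; omega
        rcases (ih p rest k).mp ⟨m, hm, hmle⟩ with h | h
        · exact Or.inl (List.mem_cons_of_mem _ h)
        · exact Or.inr h
      · intro h
        have h' : k ∈ pre ∨ k = p := by
          rcases h with h | h
          · rcases List.mem_cons.mp h with rfl | h
            · simp at hq
            · exact Or.inl h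
          · exact Or.inr h
        obtain ⟨m, hm, hmle⟩ := (ih p rest k).mpr h'
        refine ⟨m + 1, by rw [hm]; rfl, ?_⟩
        simp only [List.length_cons]
        omega

theorem pvB_loop (sp : List (Int × Int)) (rest : List (Int × Int)) :
    ∀ (pre : List (Int × Int)) (c : Int), sp = pre ++ rest →
    (PySem.List.enumerate rest (pre.length : Int)).foldl
      (fun (c : Int) ip =>
        match (sp.idxOf? (ip.2.2, ip.2.1)).map (fun n => ((n : Nat) : Int)) with
        | some j => if j ≤ ip.1 then c + 1 else c
        | none => c) c
    = c + pvGo pre rest := by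
  induction rest with
  | nil => intro pre c _; simp [PySem.List.enumerate, pvGo]
  | cons p rest ih =>
    intro pre c hsp
    subst hsp
    rw [PySem.List.enumerate_cons, List.foldl_cons]
    dsimp only
    have hiff := pv_idx_le pre p rest (p.2, p.1)
    have harith : ((pre.length : Int) + 1) = (((pre ++ [p]).length : Nat) : Int) := by
      simp [List.length_append]
    have hlist : pre ++ p :: rest = (pre ++ [p]) ++ rest := by simp
    by_cases hmem : ((p.2, p.1) ∈ pre ∨ (p.2, p.1) = p)
    · obtain ⟨n, hn, hle⟩ := hiff.mpr hmem
      rw [hn]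
      simp only [Option.map_some]
      rw [if_pos (show ((n : Nat) : Int) ≤ (pre.length : Int) from by exact_mod_cast hle)]
      have hrec := ih (pre ++ [p]) (c + 1) hlist
      rw [← harith] at hrec
      rw [hrec, pvGo]
      have hm : (p.2, p.1) ∈ pre ++ [p] := by
        rcases hmem with h | h
        · exact List.mem_append_left _ h
        · exact List.mem_append_right _ (by simp [h])
      rw [if_pos hm]; ring
    · have hnm : (p.2, p.1) ∉ pre ++ [p] := by
        intro h; apply hmem
        rcases List.mem_append.mp h with h | h
        · exact Or.inl h
        · exact Or.inr (by simpa using h)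
      have hrec := ih (pre ++ [p]) c hlist
      rw [← harith] at hrec
      cases hn : (pre ++ p :: rest).idxOf? (p.2, p.1) with
      | none =>
        simp only [Option.map_none]
        rw [hrec, pvGo, if_neg hnm]; ring
      | some n =>
        simp only [Option.map_some]
        rw [if_neg (show ¬ ((n : Nat) : Int) ≤ (pre.length : Int) from by
          intro hle
          exact hmem (hiff.mp ⟨n, hn, by exact_mod_cast hle⟩))]
        rw [hrec, pvGo, if_neg hnm]; ring

-- ===== VERDICT (by name: the statement is the Claim_ definition above) =====
theorem num_equiv_species_pairs_spec : Claim_equal_num_equiv_species_pairs := by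
  intro sp _
  unfold Spec_num_equiv_species_pairs
  have hA : num_equiv_species_pairs sp = 0 + pvGo [] sp := by
    unfold num_equiv_species_pairs
    exact pvA_loop sp [] 0
  have hB : num_equiv_species_pairs_alt sp = 0 + pvGo [] sp := by
    unfold num_equiv_species_pairs_alt
    have hfun : (fun (c : Int) (ip : Int × (Int × Int)) =>
        match ((PySem.List.enumerate sp 0).foldl
          (fun d ip =>
            if d.contains (ip.2.1, ip.2.2) then d else d.insert (ip.2.1, ip.2.2) ip.1)
          PySem.Dict.empty).get? (ip.2.2, ip.2.1) with
        | some j => if j ≤ ip.1 then c + 1 else c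
        | none => c)
      = (fun (c : Int) (ip : Int × (Int × Int)) =>
        match (sp.idxOf? (ip.2.2, ip.2.1)).map (fun n => ((n : Nat) : Int)) with
        | some j => if j ≤ ip.1 then c + 1 else c
        | none => c) := by
      funext c ip
      rw [pvFO_get]
      have he : (PySem.Dict.empty : PySem.Dict (Int × Int) Int).get? (ip.2.2, ip.2.1) = none := rfl
      rw [he]
      rcases List.idxOf? (ip.2.2, ip.2.1) sp with _ | n <;> simp
    show (PySem.List.enumerate sp 0).foldl _ 0 = _
    rw [hfun]
    have := pvB_loop sp sp [] 0 rfl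
    simpa using this
  rw [hA, hB]
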